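-- pv_equiv track=rewrite | github.com/ravenclaw-b/adventofcode2024 | Day 13/Day 12/d12.py | calc
-- ===== SOURCE A (Python) =====
-- def calc (comps):
--     l = len(comps)
--     p = 4*l
--     comps_list = list(comps)
--
--     for i in range(l-1):
--         for j in range(i+1, l):
--             if comps_list[i][0] == comps_list[j][0] and abs(comps_list[i][1]-comps_list[j][1]) == 1:
--                 p -= 2
--             elif comps_list[i][1] == comps_list[j][1] and abs(comps_list[i][0]-comps_list[j][0]) == 1:
--                 p -= 2
--     return p*l
-- ===== SOURCE B (Python) =====
-- def calc(comps):
--     l = len(comps)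
--     cnt = {}
--     for c in comps:
--         key = (c[0], c[1])
--         cnt[key] = cnt.get(key, 0) + 1
--     adj = 0
--     for (x, y), n in cnt.items():
--         adj += n * (cnt.get((x, y + 1), 0) + cnt.get((x + 1, y), 0))
--     return (4 * l - 2 * adj) * l
-- ===== Notes on version B (the rewrite author's own statement) =====
-- stated objective: faster
-- what changed: B replaces A's all-pairs O(n^2) adjacency scan by building one hash counter of the (x,y) cells and summing, per distinct cell, count*(count of its up-neighbour + count of its right-neighbour), which counts each adjacent pair exactly once.
-- outside the precondition, e.g. on calc([(5,)]): A returns 4, B raises IndexError; on calc([()]): A returns 4, B raises IndexError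
import Mathlib
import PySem

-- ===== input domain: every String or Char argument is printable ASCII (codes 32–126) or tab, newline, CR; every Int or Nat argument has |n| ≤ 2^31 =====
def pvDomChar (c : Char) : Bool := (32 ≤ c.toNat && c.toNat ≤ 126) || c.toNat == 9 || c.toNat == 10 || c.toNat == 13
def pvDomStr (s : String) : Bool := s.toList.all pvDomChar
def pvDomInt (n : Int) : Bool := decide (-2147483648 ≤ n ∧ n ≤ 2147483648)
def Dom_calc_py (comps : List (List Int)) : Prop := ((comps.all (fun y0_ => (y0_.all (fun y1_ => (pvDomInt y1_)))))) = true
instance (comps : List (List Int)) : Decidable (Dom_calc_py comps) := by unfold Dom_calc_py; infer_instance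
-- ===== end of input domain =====

-- B replaces A's all-pairs adjacency scan by a single hash-counter pass over the cells (faster; return value only).


-- ===== PORT A =====
-- literal port of A's nested index loops; abs(e) == 1 is ported as e.natAbs = 1 (identical on Int);
-- the coordinate accesses c[0]/c[1] use pyGetD (Python raises out of range — excluded by Pre_).
def calc_py (comps : List (List Int)) : Int :=
  let l : Int := comps.length
  let p : Int := 4 * l
  let compsList : List (List Int) := comps
  let p :=
    (PySem.List.pyRange 0 (l - 1)).foldl (fun p i =>
      (PySem.List.pyRange (i + 1) l).foldl (fun p j =>
        if PySem.List.pyGetD (PySem.List.pyGetD compsList i []) 0 0 =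
             PySem.List.pyGetD (PySem.List.pyGetD compsList j []) 0 0 ∧
           (PySem.List.pyGetD (PySem.List.pyGetD compsList i []) 1 0 -
             PySem.List.pyGetD (PySem.List.pyGetD compsList j []) 1 0).natAbs = 1 then p - 2
        else if PySem.List.pyGetD (PySem.List.pyGetD compsList i []) 1 0 =
             PySem.List.pyGetD (PySem.List.pyGetD compsList j []) 1 0 ∧
           (PySem.List.pyGetD (PySem.List.pyGetD compsList i []) 0 0 -
             PySem.List.pyGetD (PySem.List.pyGetD compsList j []) 0 0).natAbs = 1 then p - 2
        else p) p) p
  p * l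

-- ===== PORT B =====
-- literal port of Source B: build a counter dict of (c[0], c[1]) cells, then one pass over its items.
def calc_py_alt (comps : List (List Int)) : Int :=
  let l : Int := comps.length
  let cnt : PySem.Dict (Int × Int) Int :=
    comps.foldl (fun d c =>
      d.insert (PySem.List.pyGetD c 0 0, PySem.List.pyGetD c 1 0)
        (d.getD (PySem.List.pyGetD c 0 0, PySem.List.pyGetD c 1 0) 0 + 1)) PySem.Dict.empty
  let adj : Int :=
    cnt.items.foldl (fun adj kv =>
      adj + kv.2 * (cnt.getD (kv.1.1, kv.1.2 + 1) 0 + cnt.getD (kv.1.1 + 1, kv.1.2) 0)) 0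
  (4 * l - 2 * adj) * l

-- ===== PRECONDITION & SPEC =====
-- Pre_ excludes inputs containing a cell with fewer than two coordinates: with ≥ 2 cells Python A raises
-- IndexError on them, and with 0 or 1 cells A never indexes a cell and returns 4*l*l while B always
-- reads c[0] and c[1] and raises there.
def Pre_calc_py (comps : List (List Int)) : Prop := ∀ c ∈ comps, 2 ≤ c.length
instance (comps : List (List Int)) : Decidable (Pre_calc_py comps) := by unfold Pre_calc_py; infer_instance
def pvWitness_calc_py : List (List Int) := [[0, 0], [0, 1], [1, 0]]

def Spec_calc_py (comps : List (List Int)) (out : Int) : Prop := out = calc_py_alt comps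
instance (comps : List (List Int)) (out : Int) : Decidable (Spec_calc_py comps out) := by unfold Spec_calc_py; infer_instance

-- ===== CLAIM (what is proved, stated in full; the proofs are below) =====
def Claim_equal_calc_py : Prop := ∀ (comps : List (List Int)), Dom_calc_py comps → Pre_calc_py comps → Spec_calc_py comps (calc_py comps)


-- ===== LEMMAS AND PROOFS =====

-- the cell a row of the input denotes (coordinates, with 0 for a missing one — never hit inside Pre_)
def pvPt (c : List Int) : Int × Int := (PySem.List.pyGetD c 0 0, PySem.List.pyGetD c 1 0)

-- the amount A subtracts from the perimeter for one pair of cells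
def pvAdj2 (x y : Int × Int) : Int :=
  if x.1 = y.1 ∧ (x.2 - y.2).natAbs = 1 then 2
  else if x.2 = y.2 ∧ (x.1 - y.1).natAbs = 1 then 2
  else 0

-- total perimeter subtraction over all unordered pairs, peeling the first cell
def pvPairSub : List (Int × Int) → Int
  | [] => 0
  | x :: t => (t.map (pvAdj2 x)).sum + pvPairSub t

-- per-cell neighbour weight used by B: count of the up-neighbour plus count of the right-neighbour
def pvNbr (xs : List (Int × Int)) (x : Int × Int) : Int :=
  (xs.count (x.1, x.2 + 1) : Int) + (xs.count (x.1 + 1, x.2) : Int)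

lemma pv_pyRange_natCast (n : Nat) : forall (a : Nat),
    PySem.List.pyRange (a : Int) ((a + n : Nat) : Int) =
      (List.range n).map (fun j => ((a + j : Nat) : Int)) := by
  induction n with
  | zero =>
    intro a
    refine (List.eq_nil_iff_forall_not_mem.mpr ?_).trans (by simp)
    intro x hx
    rw [PySem.List.mem_pyRange_one] at hx
    omega
  | succ n ih =>
    intro a
    have hlt : (a : Int) < ((a + (n + 1) : Nat) : Int) := by push_cast; omega
    rw [PySem.List.pyRange_one_cons hlt]
    have h1 : ((a : Int) + 1) = ((a + 1 : Nat) : Int) := by push_cast; ring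
    have h2 : ((a + (n + 1) : Nat) : Int) = (((a + 1) + n : Nat) : Int) := by push_cast; ring
    rw [h1, h2, ih (a + 1), List.range_succ_eq_map, List.map_cons, List.map_map]
    refine congrArg₂ _ (by push_cast; ring) ?_
    refine List.map_congr_left ?_
    intro j _
    simp only [Function.comp_def, Nat.succ_eq_add_one]
    push_cast
    ring

lemma pv_foldl_if_sub {α : Type} (l : List α) (p1 p2 : α → Prop)
    [DecidablePred p1] [DecidablePred p2] (a : Int) :
    l.foldl (fun acc x => if p1 x then acc - 2 else if p2 x then acc - 2 else acc) a
      = a + (l.map (fun x => if p1 x then (-2 : Int) else if p2 x then -2 else 0)).sum := by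
  rw [PySem.List.foldl_congr_mem l _
    (fun acc x => acc + (if p1 x then (-2 : Int) else if p2 x then -2 else 0)) a
    (by
      intro acc x _
      by_cases h1 : p1 x <;> by_cases h2 : p2 x <;> simp [h1, h2] <;> ring)]
  exact PySem.List.foldl_add _ _ _

-- sum of negated terms (no ready-made list lemma in this Mathlib: via sum_map_mul_left)
lemma pv_sum_map_neg {α : Type} (l : List α) (f : α → Int) :
    (l.map (fun x => -f x)).sum = -(l.map f).sum := by
  calc (l.map (fun x => -f x)).sum
      = (l.map (fun x => (-1 : Int) * f x)).sum := by
        refine congrArg _ (List.map_congr_left ?_)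
        intro y _
        ring
    _ = (-1 : Int) * (l.map f).sum := List.sum_map_mul_left _ _ _
    _ = -(l.map f).sum := by ring

lemma pv_getD_map_pt (comps : List (List Int)) (i : Nat) :
    (comps.map pvPt).getD i (0, 0) = pvPt (comps.getD i []) := by
  rcases Nat.lt_or_ge i comps.length with h | h
  . rw [List.getD_eq_getElem _ _ (by simpa using h), List.getD_eq_getElem _ _ h]
    simp
  . rw [List.getD_eq_default _ _ (by simpa using h), List.getD_eq_default _ _ h]
    decide

lemma pv_map_range_getD {β : Type} (t : List (Int × Int)) (f : Int × Int → β) :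
    (List.range t.length).map (fun k => f (t.getD k (0, 0))) = t.map f := by
  induction t with
  | nil => simp
  | cons x t ih =>
    rw [List.length_cons, List.range_succ_eq_map, List.map_cons, List.map_map]
    simp only [Function.comp_def, Nat.succ_eq_add_one, List.getD_cons_zero, List.getD_cons_succ]
    rw [ih, List.map_cons]

-- A's double index loop computes pvPairSub
lemma pv_sumIdx (xs : List (Int × Int)) :
    ((List.range (xs.length - 1)).map (fun i =>
        ((List.range (xs.length - (i + 1))).map (fun k =>
            pvAdj2 (xs.getD i (0, 0)) (xs.getD (i + 1 + k) (0, 0)))).sum)).sum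
      = pvPairSub xs := by
  induction xs with
  | nil => simp [pvPairSub]
  | cons x t ih =>
    cases t with
    | nil => simp [pvPairSub]
    | cons y t' =>
      rw [pvPairSub]
      have hlen : (x :: y :: t').length - 1 = t'.length + 1 := by simp
      rw [hlen, List.range_succ_eq_map, List.map_cons, List.sum_cons, List.map_map]
      congr 1
      . -- the i = 0 term pairs x with every later cell
        simp only [show forall k : Nat, 0 + 1 + k = k + 1 from fun k => by omega,
          List.getD_cons_zero, List.getD_cons_succ, Nat.zero_add,
          show (x :: y :: t').length - 1 = (y :: t').length from by simp]
        rw [pv_map_range_getD]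
      . -- the i ≥ 1 terms are the statement for the tail
        rw [← ih,
          show (y :: t').length - 1 = t'.length from by simp]
        refine congrArg _ (List.map_congr_left ?_)
        intro j _
        simp only [Function.comp_def, Nat.succ_eq_add_one,
          show forall k : Nat, j + 1 + 1 + k = (j + 1 + k) + 1 from fun k => by omega,
          show (x :: y :: t').length - (j + 1 + 1) = (y :: t').length - (j + 1) from by simp,
          List.getD_cons_succ]

-- the transliterated nested range loop, rewritten as a double sum over Nat ranges
lemma pv_outer (n : Nat) (q1 q2 : Int → Int → Prop)
    [inst1 : forall i j, Decidable (q1 i j)] [inst2 : forall i j, Decidable (q2 i j)] (a : Int) :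
    (PySem.List.pyRange 0 (n : Int)).foldl (fun p i =>
        (PySem.List.pyRange (i + 1) ((n + 1 : Nat) : Int)).foldl (fun p j =>
          if q1 i j then p - 2 else if q2 i j then p - 2 else p) p) a
      = a + ((List.range n).map (fun k =>
          ((List.range (n - k)).map (fun d =>
            if q1 (k : Int) ((k + 1 + d : Nat) : Int) then (-2 : Int)
            else if q2 (k : Int) ((k + 1 + d : Nat) : Int) then -2 else 0)).sum)).sum := by
  rw [PySem.List.pyRange_zero_natCast]
  rw [PySem.List.foldl_congr_mem _ _ (fun p i =>
      p + ((PySem.List.pyRange (i + 1) ((n + 1 : Nat) : Int)).map (fun j =>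
        if q1 i j then (-2 : Int) else if q2 i j then -2 else 0)).sum) a
    (by
      intro acc i _
      exact pv_foldl_if_sub _ (q1 i) (q2 i) acc)]
  rw [PySem.List.foldl_add, List.map_map]
  refine congrArg _ (congrArg _ (List.map_congr_left ?_))
  intro k hk
  rw [List.mem_range] at hk
  simp only [Function.comp_def]
  have h1 : ((k : Int) + 1) = ((k + 1 : Nat) : Int) := by push_cast; ring
  have h2 : ((n + 1 : Nat) : Int) = (((k + 1) + (n - k) : Nat) : Int) := by
    have h : (k + 1) + (n - k) = n + 1 := by omega
    rw [h]
  rw [h1, h2, pv_pyRange_natCast (n - k) (k + 1), List.map_map]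
  refine congrArg _ (List.map_congr_left ?_)
  intro d _
  simp only [Function.comp_def]

-- the loop body's branch value, written through pvAdj2 on the denoted cells
lemma pv_cond (comps : List (List Int)) (a b : Nat) :
    (if PySem.List.pyGetD (PySem.List.pyGetD comps (a : Int) []) 0 0 =
          PySem.List.pyGetD (PySem.List.pyGetD comps (b : Int) []) 0 0 ∧
        (PySem.List.pyGetD (PySem.List.pyGetD comps (a : Int) []) 1 0 -
          PySem.List.pyGetD (PySem.List.pyGetD comps (b : Int) []) 1 0).natAbs = 1 then (-2 : Int)
     else if PySem.List.pyGetD (PySem.List.pyGetD comps (a : Int) []) 1 0 =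
          PySem.List.pyGetD (PySem.List.pyGetD comps (b : Int) []) 1 0 ∧
        (PySem.List.pyGetD (PySem.List.pyGetD comps (a : Int) []) 0 0 -
          PySem.List.pyGetD (PySem.List.pyGetD comps (b : Int) []) 0 0).natAbs = 1 then -2 else 0)
      = -(pvAdj2 ((comps.map pvPt).getD a (0, 0)) ((comps.map pvPt).getD b (0, 0))) := by
  rw [pv_getD_map_pt, pv_getD_map_pt]
  simp only [PySem.List.pyGetD_natCast, pvAdj2, pvPt]
  split_ifs <;> norm_num

-- A = perimeter formula
lemma pv_A_eq (comps : List (List Int)) :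
    calc_py comps = (4 * (comps.length : Int) - pvPairSub (comps.map pvPt)) * (comps.length : Int) := by
  cases comps with
  | nil => simp [calc_py, pvPairSub]
  | cons c0 t0 =>
    simp only [calc_py, List.length_cons]
    rw [show ((t0.length + 1 : Nat) : Int) - 1 = ((t0.length : Nat) : Int) from by push_cast; ring]
    rw [pv_outer t0.length
      (fun i j => PySem.List.pyGetD (PySem.List.pyGetD (c0 :: t0) i []) 0 0 =
          PySem.List.pyGetD (PySem.List.pyGetD (c0 :: t0) j []) 0 0 ∧
        (PySem.List.pyGetD (PySem.List.pyGetD (c0 :: t0) i []) 1 0 -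
          PySem.List.pyGetD (PySem.List.pyGetD (c0 :: t0) j []) 1 0).natAbs = 1)
      (fun i j => PySem.List.pyGetD (PySem.List.pyGetD (c0 :: t0) i []) 1 0 =
          PySem.List.pyGetD (PySem.List.pyGetD (c0 :: t0) j []) 1 0 ∧
        (PySem.List.pyGetD (PySem.List.pyGetD (c0 :: t0) i []) 0 0 -
          PySem.List.pyGetD (PySem.List.pyGetD (c0 :: t0) j []) 0 0).natAbs = 1)
      (4 * ((t0.length + 1 : Nat) : Int))]
    have hX : ((List.range t0.length).map (fun k =>
        ((List.range (t0.length - k)).map (fun d =>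
          if PySem.List.pyGetD (PySem.List.pyGetD (c0 :: t0) (k : Int) []) 0 0 =
              PySem.List.pyGetD (PySem.List.pyGetD (c0 :: t0) ((k + 1 + d : Nat) : Int) []) 0 0 ∧
            (PySem.List.pyGetD (PySem.List.pyGetD (c0 :: t0) (k : Int) []) 1 0 -
              PySem.List.pyGetD (PySem.List.pyGetD (c0 :: t0) ((k + 1 + d : Nat) : Int) []) 1 0).natAbs = 1
          then (-2 : Int)
          else if PySem.List.pyGetD (PySem.List.pyGetD (c0 :: t0) (k : Int) []) 1 0 =
              PySem.List.pyGetD (PySem.List.pyGetD (c0 :: t0) ((k + 1 + d : Nat) : Int) []) 1 0 ∧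
            (PySem.List.pyGetD (PySem.List.pyGetD (c0 :: t0) (k : Int) []) 0 0 -
              PySem.List.pyGetD (PySem.List.pyGetD (c0 :: t0) ((k + 1 + d : Nat) : Int) []) 0 0).natAbs = 1
          then -2 else 0)).sum)).sum
        = -pvPairSub ((c0 :: t0).map pvPt) := by
      rw [← pv_sumIdx ((c0 :: t0).map pvPt)]
      simp only [List.length_map, List.length_cons, Nat.succ_sub_succ, Nat.sub_zero]
      rw [← pv_sum_map_neg]
      refine congrArg _ (List.map_congr_left ?_)
      intro k _
      rw [← pv_sum_map_neg]
      refine congrArg _ (List.map_congr_left ?_)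
      intro d _
      exact pv_cond (c0 :: t0) k (k + 1 + d)
    rw [hX]
    ring

-- the two LawfulBEq instances on pairs count identically
lemma pv_count_eq (m : Int × Int) (xs : List (Int × Int)) :
    @List.count (Int × Int) instBEqOfDecidableEq m xs = List.count m xs := by
  induction xs with
  | nil => rfl
  | cons a t ih => simp only [List.count_cons, beq_iff_eq, ih]

-- a sum over the distinct cells weighted by multiplicity is a sum over all cells
lemma pv_setsum (xs : List (Int × Int)) (g : Int × Int → Int) :
    ((PySem.Set.ofList xs).map (fun u => (xs.count u : Int) * g u)).sum = (xs.map g).sum := by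
  have hnd := PySem.Set.nodup_ofList xs
  have hfs : (PySem.Set.ofList xs).toFinset = xs.toFinset := by
    ext u
    simp [PySem.Set.mem_ofList]
  rw [← List.sum_toFinset _ hnd, hfs, Finset.sum_list_map_count]
  refine Finset.sum_congr rfl ?_
  intro m _
  rw [nsmul_eq_mul, pv_count_eq]

-- B = counter formula
lemma pv_B_eq (comps : List (List Int)) :
    calc_py_alt comps =
      (4 * (comps.length : Int) - 2 * ((comps.map pvPt).map (pvNbr (comps.map pvPt))).sum) *
        (comps.length : Int) := by
  simp only [calc_py_alt]
  have hcnt : comps.foldl (fun d c =>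
      d.insert (PySem.List.pyGetD c 0 0, PySem.List.pyGetD c 1 0)
        (d.getD (PySem.List.pyGetD c 0 0, PySem.List.pyGetD c 1 0) 0 + 1)) PySem.Dict.empty
      = PySem.Dict.counter (comps.map pvPt) := by
    rw [← PySem.Dict.foldl_insert_getD_add_one_eq_counter, List.foldl_map]
    rfl
  rw [hcnt]
  have hadj : (PySem.Dict.counter (comps.map pvPt)).items.foldl (fun adj kv =>
      adj + kv.2 * ((PySem.Dict.counter (comps.map pvPt)).getD (kv.1.1, kv.1.2 + 1) 0
        + (PySem.Dict.counter (comps.map pvPt)).getD (kv.1.1 + 1, kv.1.2) 0)) 0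
      = ((comps.map pvPt).map (pvNbr (comps.map pvPt))).sum := by
    rw [PySem.List.foldl_add, PySem.Dict.items_counter, List.map_map]
    rw [show ((fun kv : (Int × Int) × Int => kv.2 *
          ((PySem.Dict.counter (comps.map pvPt)).getD (kv.1.1, kv.1.2 + 1) 0
            + (PySem.Dict.counter (comps.map pvPt)).getD (kv.1.1 + 1, kv.1.2) 0)) ∘
          (fun k => (k, (List.count k (comps.map pvPt) : Int))))
        = (fun u => ((comps.map pvPt).count u : Int) * pvNbr (comps.map pvPt) u) from
      funext (fun u => by
        simp [PySem.Dict.getD_counter, pvNbr])]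
    rw [pv_setsum]
    ring
  rw [hadj]

-- each unordered adjacent pair contributes 2, and is seen exactly once among the four directed relations
lemma pv_adj2_eq (x y : Int × Int) :
    pvAdj2 x y = 2 * ((if y = (x.1, x.2 + 1) then (1 : Int) else 0)
      + (if y = (x.1 + 1, x.2) then 1 else 0)
      + ((if (y.1, y.2 + 1) = x then 1 else 0)
      + (if (y.1 + 1, y.2) = x then 1 else 0))) := by
  obtain ⟨a, b⟩ := x
  obtain ⟨c, d⟩ := y
  simp only [pvAdj2, Prod.mk.injEq]
  split_ifs <;> omega

lemma pv_sum_indicator (t : List (Int × Int)) (v : Int × Int) :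
    (t.map (fun y => if y = v then (1 : Int) else 0)).sum = (t.count v : Int) := by
  induction t with
  | nil => simp
  | cons a t ih =>
    rw [List.map_cons, List.sum_cons, List.count_cons]
    push_cast
    rw [ih]
    by_cases h : a = v <;> simp [h]
    ring

-- the central identity: the pair sum equals twice B's neighbour-count sum
lemma pv_main (xs : List (Int × Int)) :
    pvPairSub xs = 2 * (xs.map (pvNbr xs)).sum := by
  induction xs with
  | nil => simp [pvPairSub]
  | cons x t ih =>
    have hup : x ≠ ((x.1, x.2 + 1) : Int × Int) := by
      obtain ⟨a, b⟩ := x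
      simp only [ne_eq, Prod.mk.injEq, not_and]
      intro _
      omega
    have hri : x ≠ ((x.1 + 1, x.2) : Int × Int) := by
      obtain ⟨a, b⟩ := x
      simp only [ne_eq, Prod.mk.injEq, not_and]
      intro h
      omega
    have hhead : pvNbr (x :: t) x = pvNbr t x := by
      simp [pvNbr, hup, hri]
    have htail : (t.map (pvNbr (x :: t))).sum
        = (t.map (pvNbr t)).sum
          + ((t.map (fun y => if (y.1, y.2 + 1) = x then (1 : Int) else 0)).sum
            + (t.map (fun y => if (y.1 + 1, y.2) = x then (1 : Int) else 0)).sum) := by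
      rw [← PySem.List.sum_map_add_int, ← PySem.List.sum_map_add_int]
      refine congrArg _ (List.map_congr_left ?_)
      intro y _
      by_cases h1 : (y.1, y.2 + 1) = x <;> by_cases h2 : (y.1 + 1, y.2) = x <;>
        have h1' : (x = (y.1, y.2 + 1)) ↔ ((y.1, y.2 + 1) = x) := eq_comm <;>
        have h2' : (x = (y.1 + 1, y.2)) ↔ ((y.1 + 1, y.2) = x) := eq_comm <;>
        simp [pvNbr, h1', h2', h1, h2] <;> ring
    have hADJ : (t.map (pvAdj2 x)).sum
        = 2 * (((t.count (x.1, x.2 + 1) : Int) + (t.count (x.1 + 1, x.2) : Int))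
            + ((t.map (fun y => if (y.1, y.2 + 1) = x then (1 : Int) else 0)).sum
              + (t.map (fun y => if (y.1 + 1, y.2) = x then (1 : Int) else 0)).sum)) := by
      calc (t.map (pvAdj2 x)).sum
          = (t.map (fun y => 2 * ((if y = (x.1, x.2 + 1) then (1 : Int) else 0)
              + (if y = (x.1 + 1, x.2) then 1 else 0)
              + ((if (y.1, y.2 + 1) = x then 1 else 0)
              + (if (y.1 + 1, y.2) = x then 1 else 0))))).sum := by
            refine congrArg _ (List.map_congr_left ?_)
            intro y _
            exact pv_adj2_eq x y
        _ = 2 * (t.map (fun y => (if y = (x.1, x.2 + 1) then (1 : Int) else 0)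
              + (if y = (x.1 + 1, x.2) then 1 else 0)
              + ((if (y.1, y.2 + 1) = x then 1 else 0)
              + (if (y.1 + 1, y.2) = x then 1 else 0)))).sum := List.sum_map_mul_left _ _ _
        _ = 2 * (((t.count (x.1, x.2 + 1) : Int) + (t.count (x.1 + 1, x.2) : Int))
              + ((t.map (fun y => if (y.1, y.2 + 1) = x then (1 : Int) else 0)).sum
                + (t.map (fun y => if (y.1 + 1, y.2) = x then (1 : Int) else 0)).sum)) := by
            rw [PySem.List.sum_map_add_int, PySem.List.sum_map_add_int,
              PySem.List.sum_map_add_int, pv_sum_indicator, pv_sum_indicator]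
    rw [pvPairSub, List.map_cons, List.sum_cons, hhead, htail, hADJ, ih]
    simp only [pvNbr]
    ring

-- ===== VERDICT (by name: the statement is the Claim_ definition above) =====
theorem calc_py_spec : Claim_equal_calc_py := by
  intro comps _ _
  unfold Spec_calc_py
  rw [pv_A_eq, pv_B_eq, pv_main]
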